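-- pv_equiv track=rewrite | github.com/sproutsai-engg/coding_question_generator | json_files/python_codes/Q_548.py | find_triplet_equal_sum
-- ===== SOURCE A (Python) =====
-- def find_triplet_equal_sum(nums):
--     n = len(nums)
--     prefix_sum = [0] * (n + 1)
--
--     for i in range(n):
--         prefix_sum[i + 1] = prefix_sum[i] + nums[i]
--
--     for i in range(1, n - 2):
--         for j in range(i + 2, n - 1):
--             for k in range(j + 2, n):
--                 s1 = prefix_sum[i]
--                 s2 = prefix_sum[j] - prefix_sum[i + 1]
--                 s3 = prefix_sum[k] - prefix_sum[j + 1]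
--                 s4 = prefix_sum[n] - prefix_sum[k + 1]
--                 if s1 == s2 == s3 == s4:
--                     return True
--     return False
-- ===== SOURCE B (Python) =====
-- def find_triplet_equal_sum(nums):
--     n = len(nums)
--     prefix_sum = [0] * (n + 1)
--     for t in range(n):
--         prefix_sum[t + 1] = prefix_sum[t] + nums[t]
--     # Fix the middle cut j; a left cut i works iff prefix_sum[i] + prefix_sum[i+1]
--     # == prefix_sum[j], and then the common part-sum is prefix_sum[i].
--     for j in range(3, n - 1):
--         left = {prefix_sum[i] for i in range(1, j - 1)
--                 if prefix_sum[i] + prefix_sum[i + 1] == prefix_sum[j]}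
--         target = prefix_sum[j + 1] + prefix_sum[n]
--         for k in range(j + 2, n):
--             if prefix_sum[k] + prefix_sum[k + 1] == target \
--                and prefix_sum[k] - prefix_sum[j + 1] in left:
--                 return True
--     return False
-- ===== Notes on version B (the rewrite author's own statement) =====
-- stated objective: faster
-- what changed: B fixes the middle cut j, builds a set of part-sums of valid left cuts, and scans right cuts for a matching set member, replacing A's triple nested loop over (i, j, k).
import Mathlib
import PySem

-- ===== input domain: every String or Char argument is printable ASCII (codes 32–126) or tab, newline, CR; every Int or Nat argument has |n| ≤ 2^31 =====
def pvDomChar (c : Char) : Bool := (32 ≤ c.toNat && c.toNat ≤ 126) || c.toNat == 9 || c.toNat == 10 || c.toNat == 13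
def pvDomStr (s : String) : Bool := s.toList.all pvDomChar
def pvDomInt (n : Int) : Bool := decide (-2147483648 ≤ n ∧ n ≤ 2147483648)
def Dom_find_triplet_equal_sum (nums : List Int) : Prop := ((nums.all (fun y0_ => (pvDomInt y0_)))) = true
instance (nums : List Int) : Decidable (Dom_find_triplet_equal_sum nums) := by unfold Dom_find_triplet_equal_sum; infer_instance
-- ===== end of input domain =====

-- B fixes the middle cut j and replaces the two remaining scans by a hash set of
-- valid left-cut part-sums plus one scan over right cuts: O(n^2) instead of A's O(n^3).
-- Both Pythons build prefix_sum with the identical loop; pvPrefix is its shared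
-- transliteration (the write into slot t+1 of the preallocated list is modelled as
-- appending the new last element; all indices read are in range, so pyGetD's
-- default is never used).
def pvPrefix (nums : List Int) : List Int :=
  (PySem.List.pyRange 0 nums.length 1).foldl
    (fun ps t => ps ++ [PySem.List.pyGetD ps t 0 + PySem.List.pyGetD nums t 0]) [0]

-- ===== PORT A =====
def find_triplet_equal_sum (nums : List Int) : Bool :=
  let n : Int := nums.length
  let ps := pvPrefix nums
  (PySem.List.pyRange 1 (n - 2) 1).any fun i =>
    (PySem.List.pyRange (i + 2) (n - 1) 1).any fun j =>
      (PySem.List.pyRange (j + 2) n 1).any fun k =>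
        let s1 := PySem.List.pyGetD ps i 0
        let s2 := PySem.List.pyGetD ps j 0 - PySem.List.pyGetD ps (i + 1) 0
        let s3 := PySem.List.pyGetD ps k 0 - PySem.List.pyGetD ps (j + 1) 0
        let s4 := PySem.List.pyGetD ps n 0 - PySem.List.pyGetD ps (k + 1) 0
        decide (s1 = s2 ∧ s2 = s3 ∧ s3 = s4)

-- ===== PORT B =====
def find_triplet_equal_sum_alt (nums : List Int) : Bool :=
  let n : Int := nums.length
  let ps := pvPrefix nums
  (PySem.List.pyRange 3 (n - 1) 1).any fun j =>
    let left : PySem.Set Int := PySem.Set.ofList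
      (((PySem.List.pyRange 1 (j - 1) 1).filter fun i =>
          decide (PySem.List.pyGetD ps i 0 + PySem.List.pyGetD ps (i + 1) 0
                    = PySem.List.pyGetD ps j 0)).map
        fun i => PySem.List.pyGetD ps i 0)
    let target := PySem.List.pyGetD ps (j + 1) 0 + PySem.List.pyGetD ps n 0
    (PySem.List.pyRange (j + 2) n 1).any fun k =>
      decide (PySem.List.pyGetD ps k 0 + PySem.List.pyGetD ps (k + 1) 0 = target) &&
      PySem.Set.contains left (PySem.List.pyGetD ps k 0 - PySem.List.pyGetD ps (j + 1) 0)

-- ===== PRECONDITION & SPEC =====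
def Spec_find_triplet_equal_sum (nums : List Int) (out : Bool) : Prop := out = find_triplet_equal_sum_alt nums
instance (nums : List Int) (out : Bool) : Decidable (Spec_find_triplet_equal_sum nums out) := by unfold Spec_find_triplet_equal_sum; infer_instance

-- ===== CLAIM (what is proved, stated in full; the proofs are below) =====
def Claim_equal_find_triplet_equal_sum : Prop := ∀ (nums : List Int), Dom_find_triplet_equal_sum nums → Spec_find_triplet_equal_sum nums (find_triplet_equal_sum nums)

-- ===== LEMMAS AND PROOFS =====

-- The two search orders find the same triples, for ANY table f of prefix sums.
lemma pv_core (f : Int → Int) (n : Int) :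
    ((PySem.List.pyRange 1 (n - 2) 1).any fun i =>
      (PySem.List.pyRange (i + 2) (n - 1) 1).any fun j =>
        (PySem.List.pyRange (j + 2) n 1).any fun k =>
          decide (f i = f j - f (i + 1) ∧ f j - f (i + 1) = f k - f (j + 1) ∧
                  f k - f (j + 1) = f n - f (k + 1)))
    =
    ((PySem.List.pyRange 3 (n - 1) 1).any fun j =>
      (PySem.List.pyRange (j + 2) n 1).any fun k =>
        decide (f k + f (k + 1) = f (j + 1) + f n) &&
        PySem.Set.contains
          (PySem.Set.ofList
            (((PySem.List.pyRange 1 (j - 1) 1).filter fun i =>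
                decide (f i + f (i + 1) = f j)).map fun i => f i))
          (f k - f (j + 1))) := by
  rw [Bool.eq_iff_iff]
  simp only [List.any_eq_true, PySem.List.mem_pyRange_one, Bool.and_eq_true,
    decide_eq_true_eq, PySem.Set.contains_iff, PySem.Set.mem_ofList, List.mem_map,
    List.mem_filter]
  constructor
  · rintro ⟨i, ⟨hi1, hi2⟩, j, ⟨hj1, hj2⟩, k, ⟨hk1, hk2⟩, e1, e2, e3⟩
    exact ⟨j, ⟨by omega, by omega⟩, k, ⟨hk1, hk2⟩, by omega,
      ⟨i, ⟨⟨by omega, by omega⟩, by omega⟩, by omega⟩⟩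
  · rintro ⟨j, ⟨hj1, hj2⟩, k, ⟨hk1, hk2⟩, e34, ⟨i, ⟨⟨hi1, hi2⟩, hij⟩, hival⟩⟩
    exact ⟨i, ⟨by omega, by omega⟩, j, ⟨by omega, by omega⟩, k, ⟨hk1, hk2⟩,
      by omega, by omega, by omega⟩

-- ===== VERDICT (by name: the statement is the Claim_ definition above) =====
theorem find_triplet_equal_sum_spec : Claim_equal_find_triplet_equal_sum := by
  intro nums _
  unfold Spec_find_triplet_equal_sum find_triplet_equal_sum find_triplet_equal_sum_alt
  exact pv_core (fun x => PySem.List.pyGetD (pvPrefix nums) x 0) nums.length
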